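-- pv_equiv track=rewrite | github.com/Qenszu/workshop | python/WDI/zestaw_1/zad_44.py | is_super_prime_pali
-- ===== SOURCE A (Python) =====
-- from math import log10
--
-- def is_prime(n):
--     if n == 2 or n == 3 or n == 5:
--         return True
--     #end if
--     if n < 2 or n % 2 == 0 or n % 3 == 0 or n % 5 == 0:
--         return False
--     #end if
--
--     i = 5
--     while i*i <= n:
--         if n % i == 0 or n % (i + 2) == 0:
--             return False
--         #end if
--         i += 6
--     #end while
--
--     return True
--
-- def is_palindrome(n):
--     if n < 10:
--         return True
--     #end if
--
--     temp = n
--     result = 0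
--
--     while n != 0:
--         result += n % 10
--         result *= 10
--         n //= 10
--     #end while
--
--     if temp == (result//10):
--         return True
--     #end if
--
--     return False
--
-- def cut(n):
--     l = int(log10(n)) + 1
--     result = n % 10**(l - 1)
--     result //= 10
--
--     return result
--
-- def is_super_prime_pali(n):
--     while n > 99:
--         if is_palindrome(n) and is_prime(n):
--             n = cut(n)
--         else:
--             return False
--         #end if
--     #end while
--
--     if is_prime(n) and is_palindrome(n):
--         return True
--     #end if
--
--     return False
-- ===== SOURCE B (Python) =====
-- def is_prime(n):
--     if n == 2 or n == 3 or n == 5: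
--         return True
--     if n < 2 or n % 2 == 0 or n % 3 == 0 or n % 5 == 0:
--         return False
--     i = 5
--     while i*i <= n:
--         if n % i == 0 or n % (i + 2) == 0:
--             return False
--         i += 6
--     return True
--
-- def is_palindrome(n):
--     if n < 10:
--         return True
--     s = str(n)
--     return s == s[::-1]
--
-- def cut(n):
--     return n // 10 % 10 ** (len(str(n)) - 2)
--
-- def is_super_prime_pali(n):
--     if n > 99:
--         return is_palindrome(n) and is_prime(n) and is_super_prime_pali(cut(n))
--     return is_prime(n) and is_palindrome(n)
-- ===== Notes on version B (the rewrite author's own statement) =====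
-- stated objective: idiomatic
-- what changed: Replaces A's arithmetic digit-reversal loop and log10-based digit strip by string reversal (str(n) == str(n)[::-1]) and string-length slicing arithmetic (n // 10 % 10**(len(str(n))-2)), and turns the peeling while-loop into a recursion.
import Mathlib
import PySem

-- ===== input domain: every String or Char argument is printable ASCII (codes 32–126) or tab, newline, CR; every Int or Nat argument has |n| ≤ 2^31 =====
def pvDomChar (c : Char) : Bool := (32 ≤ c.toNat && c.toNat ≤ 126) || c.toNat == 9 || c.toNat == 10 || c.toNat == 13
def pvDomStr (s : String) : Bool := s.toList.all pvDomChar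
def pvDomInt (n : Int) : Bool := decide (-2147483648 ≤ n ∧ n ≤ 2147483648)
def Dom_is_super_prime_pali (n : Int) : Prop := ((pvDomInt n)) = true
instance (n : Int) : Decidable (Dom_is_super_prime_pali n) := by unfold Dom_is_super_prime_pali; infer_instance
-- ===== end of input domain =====

-- B replaces A's arithmetic digit-reversal palindrome test and log10-based digit strip by
-- string reversal / string-length arithmetic and a recursive peel (objective: idiomatic).

-- ===== PORT A =====
-- while i*i <= n: … i += 6  (fuel only makes the loop total; n.toNat+1 iterations always suffice)
def pvPrimeLoop (fuel : Nat) (n i : Int) : Bool :=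
  match fuel with
  | 0 => true
  | f + 1 =>
    if i * i ≤ n then
      if PySem.Int.mod n i == 0 || PySem.Int.mod n (i + 2) == 0 then false
      else pvPrimeLoop f n (i + 6)
    else true

def pv_is_prime (n : Int) : Bool :=
  if n == 2 || n == 3 || n == 5 then true
  else if n < 2 || PySem.Int.mod n 2 == 0 || PySem.Int.mod n 3 == 0 || PySem.Int.mod n 5 == 0 then false
  else pvPrimeLoop (n.toNat + 1) n 5

-- while n != 0: result += n%10; result *= 10; n //= 10  (fuel totalises; n.toNat+1 suffices)
def pvPalLoop (fuel : Nat) (n result : Int) : Int :=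
  match fuel with
  | 0 => result
  | f + 1 =>
    if n == 0 then result
    else pvPalLoop f (PySem.Int.floordiv n 10) ((result + PySem.Int.mod n 10) * 10)

def pv_is_palindrome (n : Int) : Bool :=
  if n < 10 then true
  else
    let result := pvPalLoop (n.toNat + 1) n 0
    n == PySem.Int.floordiv result 10

-- l = int(log10(n)) + 1 is ported as Nat.log 10 n + 1, the exact floor logarithm: for the inputs
-- cut actually receives (primes > 99, hence 100 ≤ n ≤ 2^31 and n not a power of 10) the float
-- log10 is exact, as float error ~1e-16 cannot cross an integer at distance ≥ 4e-11.
def pv_cut (n : Int) : Int :=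
  let l : Nat := Nat.log 10 n.toNat + 1
  PySem.Int.floordiv (PySem.Int.mod n (10 ^ (l - 1))) 10

def pvMainLoop (fuel : Nat) (n : Int) : Bool :=
  match fuel with
  | 0 => false
  | f + 1 =>
    if n > 99 then
      if pv_is_palindrome n && pv_is_prime n then pvMainLoop f (pv_cut n) else false
    else pv_is_prime n && pv_is_palindrome n

def is_super_prime_pali (n : Int) : Bool := pvMainLoop (n.toNat + 1) n

-- ===== PORT B =====
-- is_prime is the identical helper in Source B; B reuses pv_is_prime.
-- s = str(n); return s == s[::-1]
def pv_is_palindrome_alt (n : Int) : Bool :=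
  if n < 10 then true
  else
    let s := PySem.Int.toChars n
    s == s.reverse

-- n // 10 % 10 ** (len(str(n)) - 2)
def pv_cut_alt (n : Int) : Int :=
  PySem.Int.mod (PySem.Int.floordiv n 10) (10 ^ ((PySem.Int.toChars n).length - 2))

-- recursion of Source B, totalised with the same fuel shape (n.toNat+1 always suffices)
def pvAltRec (fuel : Nat) (n : Int) : Bool :=
  match fuel with
  | 0 => false
  | f + 1 =>
    if n > 99 then pv_is_palindrome_alt n && pv_is_prime n && pvAltRec f (pv_cut_alt n)
    else pv_is_prime n && pv_is_palindrome_alt n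

def is_super_prime_pali_alt (n : Int) : Bool := pvAltRec (n.toNat + 1) n

-- ===== PRECONDITION & SPEC =====
def Spec_is_super_prime_pali (n : Int) (out : Bool) : Prop := out = is_super_prime_pali_alt n
instance (n : Int) (out : Bool) : Decidable (Spec_is_super_prime_pali n out) := by unfold Spec_is_super_prime_pali; infer_instance

-- ===== CLAIM (what is proved, stated in full; the proofs are below) =====
def Claim_equal_is_super_prime_pali : Prop := ∀ (n : Int), Dom_is_super_prime_pali n → Spec_is_super_prime_pali n (is_super_prime_pali n)

-- ===== LEMMAS AND PROOFS =====

theorem pv_toDigitsCore_eq (f : Nat) : ∀ (m : Nat) (acc : List Char), 0 < m → m ≤ f →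
    Nat.toDigitsCore 10 f m acc = ((Nat.digits 10 m).map Nat.digitChar).reverse ++ acc := by
  induction f with
  | zero => intro m acc hm hf; omega
  | succ f ih =>
    intro m acc hm hf
    rw [Nat.toDigitsCore]
    rw [Nat.digits_def' (by norm_num : 1 < 10) hm]
    by_cases h : m / 10 = 0
    · simp [h, Nat.mod_eq_of_lt (by omega : m < 10)]
    · rw [if_neg h, ih (m / 10) _ (Nat.pos_of_ne_zero h) (by omega)]
      simp

theorem pv_toDigits_eq (m : Nat) (hm : 0 < m) :
    Nat.toDigits 10 m = ((Nat.digits 10 m).map Nat.digitChar).reverse := by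
  rw [Nat.toDigits, pv_toDigitsCore_eq (m + 1) m [] hm (by omega), List.append_nil]

theorem pv_palLoop_zero (f : Nat) (r : Int) : pvPalLoop f 0 r = r := by
  cases f <;> simp [pvPalLoop]

theorem pv_palLoop_eq (f : Nat) : ∀ (m : Nat) (r : Int), 0 < m → m ≤ f →
    pvPalLoop f (m : Int) r =
      r * 10 ^ (Nat.digits 10 m).length + ((Nat.ofDigits 10 (Nat.digits 10 m).reverse : Nat) : Int) * 10 := by
  induction f with
  | zero => intro m r hm hf; omega
  | succ f ih =>
    intro m r hm hf
    rw [pvPalLoop]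
    rw [if_neg (by simp; omega)]
    have hfd : PySem.Int.floordiv (m : Int) 10 = ((m / 10 : Nat) : Int) := by
      exact_mod_cast PySem.Int.floordiv_natCast m 10
    have hmd : PySem.Int.mod (m : Int) 10 = ((m % 10 : Nat) : Int) := by
      exact_mod_cast PySem.Int.mod_natCast m 10
    rw [hfd, hmd, Nat.digits_def' (by norm_num : 1 < 10) hm]
    by_cases h : m / 10 = 0
    · rw [h, Nat.cast_zero, pv_palLoop_zero]
      have : m % 10 = m := Nat.mod_eq_of_lt (by omega)
      rw [this]
      simp
      ring
    · rw [ih (m / 10) _ (Nat.pos_of_ne_zero h) (by omega)]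
      rw [List.reverse_cons, Nat.ofDigits_append, Nat.ofDigits_singleton]
      push_cast
      simp only [List.length_reverse, List.length_cons]
      ring

theorem pv_ofDigits_inj : ∀ (L1 L2 : List Nat), L1.length = L2.length →
    (∀ d ∈ L1, d < 10) → (∀ d ∈ L2, d < 10) →
    Nat.ofDigits 10 L1 = Nat.ofDigits 10 L2 → L1 = L2 := by
  intro L1
  induction L1 with
  | nil => intro L2 hl _ _ _; cases L2 <;> simp_all
  | cons a L ih =>
    intro L2 hl h1 h2 heq
    cases L2 with
    | nil => simp_all
    | cons b M =>
      rw [Nat.ofDigits_cons, Nat.ofDigits_cons] at heq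
      have ha : a < 10 := h1 a (by simp)
      have hb : b < 10 := h2 b (by simp)
      have hab : a = b := by omega
      have : Nat.ofDigits 10 L = Nat.ofDigits 10 M := by omega
      have := ih M (by simpa using hl) (fun d hd => h1 d (by simp [hd])) (fun d hd => h2 d (by simp [hd])) this
      simp_all

theorem pv_digitChar_inj (a b : Nat) (ha : a < 10) (hb : b < 10)
    (h : Nat.digitChar a = Nat.digitChar b) : a = b := by
  interval_cases a <;> interval_cases b <;> simp_all [Nat.digitChar]

theorem pv_map_digitChar_inj (L1 : List Nat) : ∀ (L2 : List Nat),
    (∀ d ∈ L1, d < 10) → (∀ d ∈ L2, d < 10) →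
    L1.map Nat.digitChar = L2.map Nat.digitChar → L1 = L2 := by
  induction L1 with
  | nil => intro L2 _ _ h; cases L2 <;> simp_all
  | cons a L ih =>
    intro L2 h1 h2 h
    cases L2 with
    | nil => simp_all
    | cons b M =>
      simp only [List.map_cons, List.cons.injEq] at h
      have := pv_digitChar_inj a b (h1 a (by simp)) (h2 b (by simp)) h.1
      have := ih M (fun d hd => h1 d (by simp [hd])) (fun d hd => h2 d (by simp [hd])) h.2
      simp_all

theorem pv_pal_eq (n : Int) : pv_is_palindrome n = pv_is_palindrome_alt n := by
  by_cases hlt : n < 10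
  · simp [pv_is_palindrome, pv_is_palindrome_alt, hlt]
  · have hm10 : (10 : Nat) ≤ n.toNat := by omega
    set m := n.toNat with hmdef
    have hn : n = (m : Int) := by omega
    have hm : 0 < m := by omega
    set D := Nat.digits 10 m with hD
    have hdlt : ∀ d ∈ D, d < 10 := fun d hd => Nat.digits_lt_base (by norm_num) hd
    rw [pv_is_palindrome, pv_is_palindrome_alt, if_neg hlt, if_neg hlt]
    -- A-side value
    have hloop : pvPalLoop (n.toNat + 1) n 0 = ((Nat.ofDigits 10 D.reverse * 10 : Nat) : Int) := by
      rw [hn]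
      simp only [Int.toNat_natCast]
      rw [pv_palLoop_eq (m + 1) m 0 hm (by omega)]
      push_cast; ring
    have hfd : PySem.Int.floordiv ((Nat.ofDigits 10 D.reverse * 10 : Nat) : Int) 10
        = ((Nat.ofDigits 10 D.reverse : Nat) : Int) := by
      rw [show ((10:Int) = ((10:Nat):Int)) by norm_num, PySem.Int.floordiv_natCast]
      norm_num
    -- B-side string
    have hs : PySem.Int.toChars n = (D.map Nat.digitChar).reverse := by
      rw [PySem.Int.toChars, if_neg (by omega), hn]
      simp only [Int.toNat_natCast]
      exact pv_toDigits_eq m hm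
    simp only [hloop, hfd, hs]
    rw [Bool.eq_iff_iff]
    simp only [beq_iff_eq, List.reverse_reverse, List.reverse_eq_iff]
    rw [← List.map_reverse]
    constructor
    · intro h
      have hmx : m = Nat.ofDigits 10 D.reverse := by exact_mod_cast hn ▸ h
      have hDD : D = D.reverse := by
        apply pv_ofDigits_inj D D.reverse (by simp) hdlt (by simpa using hdlt)
        rw [← hmx, hD, Nat.ofDigits_digits]
      rw [← hDD]
    · intro h
      have hDD : D = D.reverse := pv_map_digitChar_inj _ _ hdlt (by simpa using hdlt) h
      rw [hn, ← hDD, hD, Nat.ofDigits_digits]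

theorem pv_cut_eq (n : Int) (hn : n > 99) : pv_cut n = pv_cut_alt n := by
  set m := n.toNat with hmdef
  have hnm : n = (m : Int) := by omega
  have hm : 100 ≤ m := by omega
  have hmne : m ≠ 0 := by omega
  set k := Nat.log 10 m with hkdef
  have hk : 2 ≤ k := by rw [hkdef]; exact (Nat.le_log_iff_pow_le (by norm_num) hmne).2 (by norm_num; omega)
  have hlen : (PySem.Int.toChars n).length = k + 1 := by
    rw [PySem.Int.toChars, if_neg (by omega), hnm]
    simp only [Int.toNat_natCast]
    rw [pv_toDigits_eq m (by omega)]
    simp only [List.length_reverse, List.length_map]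
    rw [Nat.length_digits 10 m (by norm_num) hmne, ← hkdef]
  rw [pv_cut, pv_cut_alt, hlen]
  simp only [← hmdef, ← hkdef, Nat.add_sub_cancel]
  have hpow : ∀ e : Nat, (10 : Int) ^ e = (((10 ^ e : Nat)) : Int) := by intro e; push_cast; ring
  rw [hnm, hpow k, hpow (k + 1 - 2), show ((10:Int) = ((10:Nat):Int)) by norm_num]
  rw [PySem.Int.mod_natCast, PySem.Int.floordiv_natCast, PySem.Int.floordiv_natCast,
    PySem.Int.mod_natCast]
  have h10 : (10:Nat) * 10^(k-1) = 10^k := by rw [← pow_succ']; congr 1; omega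
  have : k + 1 - 2 = k - 1 := by omega
  rw [this, Nat.cast_inj, ← h10]
  exact Nat.mod_mul_right_div_self m 10 (10 ^ (k - 1))

theorem pv_loops_eq (f : Nat) : ∀ (n : Int), pvMainLoop f n = pvAltRec f n := by
  induction f with
  | zero => intro n; rfl
  | succ f ih =>
    intro n
    rw [pvMainLoop, pvAltRec]
    by_cases h99 : n > 99
    · rw [if_pos h99, if_pos h99, pv_pal_eq, pv_cut_eq n h99, ih]
      cases pv_is_palindrome_alt n <;> cases pv_is_prime n <;> simp
    · rw [if_neg h99, if_neg h99, pv_pal_eq, Bool.and_comm]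

-- ===== VERDICT (by name: the statement is the Claim_ definition above) =====
theorem is_super_prime_pali_spec : Claim_equal_is_super_prime_pali := by
  intro n _
  unfold Spec_is_super_prime_pali is_super_prime_pali is_super_prime_pali_alt
  exact pv_loops_eq _ n
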